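-- pv_equiv track=rewrite | github.com/woodcol/wifi-16-head-clicker | micropython/固件/esp官方常规固件/uploadpyfile.py | findComPortFromStr
-- ===== SOURCE A (Python) =====
-- def findComPortFromStr(s):
--     tmps = s.split('\n')
--     for i,v in enumerate(tmps):
--         tmpv = v.replace('\r','')
--         if tmpv.find('Serial port COM') != -1:
--             ttcom = tmpv.split(' ')[-1]
--             return ttcom
--     return None
-- ===== SOURCE B (Python) =====
-- def findComPortFromStr(s):
--     clean = s.replace('\r', '')
--     _head, sep, tail = clean.partition('Serial port COM')
--     if not sep:
--         return None
--     rest_of_line = tail.split('\n', 1)[0]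
--     return ('COM' + rest_of_line).split(' ')[-1]
-- ===== Notes on version B (the rewrite author's own statement) =====
-- stated objective: alternative
-- what changed: A splits the text into lines and scans each line (per-line \r-strip, per-line substring search) until one contains the marker; B cleans \r once, locates the marker with a single str.partition substring search, slices off the rest of the enclosing line, and takes its last space-separated token.
import Mathlib
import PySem

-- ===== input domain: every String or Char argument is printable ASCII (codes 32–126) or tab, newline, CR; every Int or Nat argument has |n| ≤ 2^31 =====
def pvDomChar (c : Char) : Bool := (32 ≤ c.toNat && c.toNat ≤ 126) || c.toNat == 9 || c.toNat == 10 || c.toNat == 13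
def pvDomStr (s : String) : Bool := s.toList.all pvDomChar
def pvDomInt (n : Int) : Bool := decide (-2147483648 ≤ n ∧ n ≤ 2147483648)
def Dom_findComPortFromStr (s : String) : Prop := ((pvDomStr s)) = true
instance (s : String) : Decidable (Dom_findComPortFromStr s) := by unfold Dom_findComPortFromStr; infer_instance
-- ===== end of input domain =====

-- ===== PORT A =====
-- B replaces A's line-by-line scan (split('\n') + per-line replace + find) by one global
-- clean + single substring search (partition) and a slice of the enclosing line (objective: alternative).
-- A-side helper: the for-loop over the lines
def pvALoop : List (List Char) → Option (List Char)
  | [] => none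
  | v :: rest =>
    let tmpv := PySem.Chars.replace v ['\r'] []
    if PySem.Chars.find tmpv "Serial port COM".toList ≠ -1 then
      PySem.List.pyGet? (PySem.Chars.splitOn tmpv [' ']) (-1)
    else pvALoop rest

def findComPortFromStr (s : String) : Option String :=
  (pvALoop (PySem.Chars.splitOn s.toList ['\n'])).map String.ofList

-- ===== PORT B =====
-- str.partition is ported by hand: find gives the first-occurrence index (exact; Python's
-- partition searches the first occurrence), the tail slice is clean[i+15:] with 0 ≤ i there.
def findComPortFromStr_alt (s : String) : Option String :=
  let clean := PySem.Chars.replace s.toList ['\r'] []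
  let i := PySem.Chars.find clean "Serial port COM".toList
  if i = -1 then none
  else
    let tail := clean.drop (i.toNat + 15)
    match PySem.List.pyGet? (PySem.Chars.splitOnMax tail ['\n'] 1) 0 with
    | none => none
    | some restOfLine =>
      (PySem.List.pyGet? (PySem.Chars.splitOn ("COM".toList ++ restOfLine) [' ']) (-1)).map String.ofList

-- ===== PRECONDITION & SPEC =====
def Spec_findComPortFromStr (s : String) (out : Option String) : Prop := out = findComPortFromStr_alt s
instance (s : String) (out : Option String) : Decidable (Spec_findComPortFromStr s out) := by unfold Spec_findComPortFromStr; infer_instance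

-- ===== CLAIM (what is proved, stated in full; the proofs are below) =====
def Claim_equal_findComPortFromStr : Prop := ∀ (s : String), Dom_findComPortFromStr s → Spec_findComPortFromStr s (findComPortFromStr s)

-- ===== LEMMAS AND PROOFS =====
def pvMk : List Char := "Serial port COM".toList

-- reference splitter: Python's s.split(c), with the piece built so far in `pre`
def pvSplitCh (c : Char) (pre : List Char) : List Char → List (List Char)
  | [] => [pre]
  | a :: t => if a = c then pre :: pvSplitCh c [] t else pvSplitCh c (pre ++ [a]) t

def pvJoin (c : Char) : List (List Char) → List Char
  | [] => []
  | x :: r => x ++ r.flatMap (fun y => c :: y)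

-- A's loop with the '\r'-filtering already applied to every line
def pvALoop0 : List (List Char) → Option (List Char)
  | [] => none
  | v :: rest =>
    if PySem.Chars.find v pvMk ≠ -1 then
      PySem.List.pyGet? (PySem.Chars.splitOn v [' ']) (-1)
    else pvALoop0 rest

-- B's computation after the global clean
def pvBCore (clean : List Char) : Option (List Char) :=
  if PySem.Chars.find clean pvMk = -1 then none
  else
    match PySem.List.pyGet? (PySem.Chars.splitOnMax
        (clean.drop ((PySem.Chars.find clean pvMk).toNat + 15)) ['\n'] 1) 0 with
    | none => none
    | some restOfLine =>
      PySem.List.pyGet? (PySem.Chars.splitOn ("COM".toList ++ restOfLine) [' ']) (-1)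
theorem replace_go_cr (l : List Char) : ∀ (fuel : Nat) (acc : List Char), l.length ≤ fuel →
    PySem.Chars.replace.go ['\r'] [] fuel l acc = acc.reverse ++ l.filter (· ≠ '\r') := by
  induction l with
  | nil => intro fuel acc h; cases fuel <;> simp [PySem.Chars.replace.go]
  | cons c t ih =>
    intro fuel acc h
    cases fuel with
    | zero => simp at h
    | succ f =>
      by_cases hc : c = '\r'
      · subst hc
        have hpre : (['\r'] : List Char).isPrefixOf ('\r' :: t) = true := by simp [List.isPrefixOf]
        simp only [PySem.Chars.replace.go, hpre, if_true]
        rw [show List.drop (['\r'] : List Char).length ('\r'::t) = t by simp,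
            show ([] : List Char).reverse ++ acc = acc by simp]
        rw [ih f acc (by simpa using h)]
        simp
      · have hpre : (['\r'] : List Char).isPrefixOf (c :: t) = false := by
          simp [List.isPrefixOf]; exact fun h => absurd h.symm hc
        simp only [PySem.Chars.replace.go, hpre]
        rw [if_neg (by simp)]
        rw [ih f (c :: acc) (by simpa using h)]
        simp [hc]

theorem replace_cr (l : List Char) :
    PySem.Chars.replace l ['\r'] [] = l.filter (· ≠ '\r') := by
  have := replace_go_cr l l.length [] le_rfl
  simpa [PySem.Chars.replace] using this

theorem splitOn_go_eq (c : Char) (l : List Char) : ∀ (fuel : Nat) (cur : List Char) (acc : List (List Char)),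
    l.length < fuel →
    PySem.Chars.splitOn.go [c] fuel l cur acc = acc.reverse ++ pvSplitCh c cur.reverse l := by
  induction l with
  | nil =>
    intro fuel cur acc h
    cases fuel with
    | zero => omega
    | succ f => simp [PySem.Chars.splitOn.go, pvSplitCh]
  | cons a t ih =>
    intro fuel cur acc h
    cases fuel with
    | zero => omega
    | succ f =>
      by_cases hc : a = c
      · subst hc
        have hpre : ([a] : List Char).isPrefixOf (a :: t) = true := by simp [List.isPrefixOf]
        simp only [PySem.Chars.splitOn.go, hpre, if_true]
        rw [show List.drop ([a] : List Char).length (a::t) = t by simp]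
        rw [ih f [] (cur.reverse :: acc) (by simp at h ⊢; omega)]
        simp [pvSplitCh]
      · have hpre : ([c] : List Char).isPrefixOf (a :: t) = false := by
          simp [List.isPrefixOf]; exact fun h => absurd h.symm hc
        simp only [PySem.Chars.splitOn.go, hpre]
        rw [if_neg (by simp)]
        rw [ih f (a :: cur) acc (by simp at h ⊢; omega)]
        simp [pvSplitCh, hc]

theorem splitOn_eq (c : Char) (l : List Char) :
    PySem.Chars.splitOn l [c] = pvSplitCh c [] l := by
  have := splitOn_go_eq c l (l.length + 1) [] [] (by omega)
  simpa [PySem.Chars.splitOn] using this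

-- splitOnMax with m = 0 returns immediately
theorem splitOnMax_go_zero (fuel : Nat) (l cur : List Char) (acc : List (List Char)) :
    PySem.Chars.splitOnMax.go ['\n'] fuel 0 l cur acc = ((cur.reverse ++ l) :: acc).reverse := by
  cases fuel with
  | zero => simp [PySem.Chars.splitOnMax.go]
  | succ f => cases l <;> simp [PySem.Chars.splitOnMax.go]

theorem splitOnMax_go_one (l : List Char) : ∀ (fuel : Nat) (cur : List Char) (acc : List (List Char)),
    l.length < fuel →
    ∃ r, PySem.Chars.splitOnMax.go ['\n'] fuel 1 l cur acc
        = acc.reverse ++ (cur.reverse ++ l.takeWhile (· ≠ '\n')) :: r := by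
  induction l with
  | nil =>
    intro fuel cur acc h
    cases fuel with
    | zero => omega
    | succ f => exact ⟨[], by simp [PySem.Chars.splitOnMax.go]⟩
  | cons a t ih =>
    intro fuel cur acc h
    cases fuel with
    | zero => omega
    | succ f =>
      by_cases hc : a = '\n'
      · subst hc
        have hpre : (['\n'] : List Char).isPrefixOf ('\n' :: t) = true := by simp [List.isPrefixOf]
        refine ⟨[t], ?_⟩
        simp only [PySem.Chars.splitOnMax.go, hpre, if_true]
        rw [if_neg (by omega)]
        rw [show (1:Nat) - 1 = 0 from rfl,
            show List.drop (['\n'] : List Char).length ('\n'::t) = t by simp]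
        rw [splitOnMax_go_zero]
        simp [List.takeWhile]
      · have hpre : (['\n'] : List Char).isPrefixOf (a :: t) = false := by
          simp [List.isPrefixOf]; exact fun h => absurd h.symm hc
        simp only [PySem.Chars.splitOnMax.go, hpre]
        rw [if_neg (by omega), if_neg (by simp)]
        obtain ⟨r, hr⟩ := ih f (a :: cur) acc (by simp at h ⊢; omega)
        refine ⟨r, ?_⟩
        rw [hr]
        simp [List.takeWhile, hc]

theorem splitOnMax_one_head (l : List Char) :
    PySem.List.pyGet? (PySem.Chars.splitOnMax l ['\n'] 1) 0 = some (l.takeWhile (· ≠ '\n')) := by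
  obtain ⟨r, hr⟩ := splitOnMax_go_one l (l.length + 1) [] [] (by omega)
  have h1 : PySem.Chars.splitOnMax l ['\n'] 1 = (l.takeWhile (· ≠ '\n')) :: r := by
    simpa [PySem.Chars.splitOnMax] using hr
  rw [h1]
  simp [PySem.List.pyGet?, PySem.List.pyIdx?]

theorem pyGet_neg_one {α : Type} (l : List α) :
    PySem.List.pyGet? l (-1) = l.getLast? := by
  cases l with
  | nil => simp [PySem.List.pyGet?, PySem.List.pyIdx?]
  | cons a t =>
    simp [PySem.List.pyGet?, PySem.List.pyIdx?]
    rw [List.getLast?_eq_getElem?]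
    simp

theorem pvSplitCh_ne_nil (c : Char) (l : List Char) : ∀ pre, pvSplitCh c pre l ≠ [] := by
  induction l with
  | nil => intro pre; simp [pvSplitCh]
  | cons a t ih =>
    intro pre
    by_cases h : a = c
    · simp [pvSplitCh, h]
    · simp only [pvSplitCh, if_neg h]
      exact ih _

theorem pvSplitCh_no_c (c : Char) (l : List Char) : ∀ pre, c ∉ pre →
    ∀ x ∈ pvSplitCh c pre l, c ∉ x := by
  induction l with
  | nil => intro pre hp x hx; simp [pvSplitCh] at hx; subst hx; exact hp
  | cons a t ih =>
    intro pre hp x hx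
    by_cases h : a = c
    · subst h
      simp [pvSplitCh] at hx
      rcases hx with rfl | hx
      · exact hp
      · exact ih [] (by simp) x hx
    · simp [pvSplitCh, h] at hx
      exact ih (pre ++ [a]) (by simp [hp]; exact fun e => h e.symm) x hx

theorem pvJoin_pvSplitCh (c : Char) (l : List Char) : ∀ pre,
    pvJoin c (pvSplitCh c pre l) = pre ++ l := by
  induction l with
  | nil => intro pre; simp [pvSplitCh, pvJoin]
  | cons a t ih =>
    intro pre
    by_cases h : a = c
    · subst h
      have := ih []
      obtain ⟨x, r, hxr⟩ : ∃ x r, pvSplitCh a [] t = x :: r := by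
        cases hsp : pvSplitCh a [] t with
        | nil => exact absurd hsp (pvSplitCh_ne_nil a t [])
        | cons x r => exact ⟨x, r, rfl⟩
      rw [hxr] at this
      simp [pvSplitCh, pvJoin, hxr] at this ⊢
      simp [this]
    · simp only [pvSplitCh, if_neg h]
      rw [ih (pre ++ [a])]
      simp
theorem pvJoin_map_filter (c : Char) (p : Char → Bool) (hpc : p c = true) (L : List (List Char)) :
    pvJoin c (L.map (List.filter p)) = (pvJoin c L).filter p := by
  cases L with
  | nil => simp [pvJoin]
  | cons x r =>
    simp only [pvJoin, List.map_cons, List.filter_append]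
    congr 1
    induction r with
    | nil => simp
    | cons y r' ih => simp [hpc] at ih ⊢; simp [ih]

theorem getLast?_cons_ne {α : Type} (a : α) {l : List α} (h : l ≠ []) :
    (a :: l).getLast? = l.getLast? := by
  cases l with
  | nil => exact absurd rfl h
  | cons x r => simp [List.getLast?_cons]

theorem pvSplitCh_getLast_append (c : Char) (y : List Char) (x : List Char) : ∀ pre,
    (pvSplitCh c pre (x ++ c :: y)).getLast? = (pvSplitCh c [] y).getLast? := by
  induction x with
  | nil =>
    intro pre
    rw [List.nil_append, show pvSplitCh c pre (c :: y) = pre :: pvSplitCh c [] y by simp [pvSplitCh]]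
    exact getLast?_cons_ne _ (pvSplitCh_ne_nil c y [])
  | cons a t ih =>
    intro pre
    by_cases h : a = c
    · subst h
      rw [List.cons_append, show pvSplitCh a pre (a :: (t ++ a :: y)) = pre :: pvSplitCh a [] (t ++ a :: y) by simp [pvSplitCh]]
      rw [getLast?_cons_ne _ (pvSplitCh_ne_nil a (t ++ a :: y) [])]
      exact ih []
    · simp only [List.cons_append, pvSplitCh, if_neg h]
      exact ih (pre ++ [a])

theorem takeWhile_append_stop (c : Char) (b : List Char) (a : List Char) (ha : c ∉ a) :
    (a ++ c :: b).takeWhile (· ≠ c) = a := by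
  induction a with
  | nil => simp
  | cons x t ih =>
    simp at ha
    rw [List.cons_append, List.takeWhile_cons_of_pos (by simp; exact fun e => ha.1 e.symm)]
    rw [ih ha.2]

theorem takeWhile_all (c : Char) (a : List Char) (ha : c ∉ a) :
    a.takeWhile (· ≠ c) = a := by
  induction a with
  | nil => simp
  | cons x t ih =>
    simp at ha
    rw [List.takeWhile_cons_of_pos (by simp; exact fun e => ha.1 e.symm)]
    rw [ih ha.2]

theorem pvMk_len : pvMk.length = 15 := by decide
theorem pvMk_no_nl : '\n' ∉ pvMk := by decide

theorem infix_of_prefix_drop {sub l : List Char} {n : Nat} (h : sub <+: l.drop n) :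
    sub <:+: l := by
  obtain ⟨t, ht⟩ := h
  exact ⟨l.take n, t, by rw [List.append_assoc, ht, List.take_append_drop]⟩

theorem find_eq_of_min (l sub : List Char) (n : Nat) (h : sub <+: l.drop n)
    (hmin : ∀ i < n, ¬ sub <+: l.drop i) : PySem.Chars.find l sub = (n : Int) := by
  have hinf : sub <:+: l := infix_of_prefix_drop h
  have hne : PySem.Chars.find l sub ≠ -1 := (PySem.Chars.find_ne_neg_one_iff _ _).2 hinf
  have h0 : 0 ≤ PySem.Chars.find l sub := by
    have := PySem.Chars.neg_one_le_find l sub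
    omega
  obtain ⟨hpre, hlt⟩ := PySem.Chars.find_spec h0
  have : (PySem.Chars.find l sub).toNat = n := by
    rcases Nat.lt_trichotomy (PySem.Chars.find l sub).toNat n with hl | he | hg
    · exact absurd hpre (hmin _ hl)
    · exact he
    · exact absurd h (hlt n hg)
  omega

theorem prefix_append_left {p a b : List Char} (h : p <+: a ++ b) (hl : p.length ≤ a.length) :
    p <+: a := by
  have h1 : (a ++ b).take p.length = p := (List.prefix_iff_eq_take.1 h).symm
  have h2 : (a ++ b).take p.length = a.take p.length := by
    rw [List.take_append, Nat.sub_eq_zero_of_le hl]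
    simp
  have : a.take p.length = p := by rw [← h2, h1]
  rw [← this]
  exact List.take_prefix _ _

theorem pv_drop_big (v w : List Char) (k : Nat) :
    (v ++ '\n' :: w).drop (v.length + 1 + k) = w.drop k := by
  rw [show v ++ '\n' :: w = (v ++ ['\n']) ++ w by simp]
  rw [show v.length + 1 + k = (v ++ ['\n']).length + k by simp]
  exact List.drop_length_add_append k

theorem pv_straddle (v w : List Char) (j : Nat)
    (h : pvMk <+: (v ++ '\n' :: w).drop j) :
    (j + 15 ≤ v.length ∧ pvMk <+: v.drop j) ∨
    (v.length + 1 ≤ j ∧ pvMk <+: w.drop (j - (v.length + 1))) := by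
  by_cases hj : j ≤ v.length
  · rw [List.drop_append_of_le_length hj] at h
    by_cases hlen : j + 15 ≤ v.length
    · left
      refine ⟨hlen, prefix_append_left h ?_⟩
      rw [pvMk_len]
      simp
      omega
    · exfalso
      obtain ⟨t, ht⟩ := h
      have hk : (v.drop j).length < 15 := by simp; omega
      have hk2 : (v.drop j).length < pvMk.length := by rw [pvMk_len]; exact hk
      have hnlmem : '\n' ∈ pvMk := by
        have e1 : (pvMk ++ t)[(v.drop j).length]? = some (pvMk[(v.drop j).length]'hk2) := by
          rw [List.getElem?_append_left hk2]
          exact List.getElem?_eq_getElem hk2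
        have e2 : (v.drop j ++ '\n' :: w)[(v.drop j).length]? = some '\n' := by
          rw [List.getElem?_append_right le_rfl]
          simp
        rw [ht, e2] at e1
        have := Option.some.inj e1
        exact this ▸ List.getElem_mem hk2
      exact pvMk_no_nl hnlmem
  · right
    obtain ⟨k, hk⟩ : ∃ k, j = v.length + 1 + k := ⟨j - (v.length + 1), by omega⟩
    subst hk
    rw [pv_drop_big] at h
    rw [show v.length + 1 + k - (v.length + 1) = k by omega]
    exact ⟨by omega, h⟩

theorem pv_occ_len {v : List Char} {n : Nat} (h : pvMk <+: v.drop n) : n + 15 ≤ v.length := by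
  have := h.length_le
  rw [pvMk_len] at this
  simp at this
  -- need n ≤ v.length too
  by_cases hn : n ≤ v.length
  · omega
  · rw [List.drop_eq_nil_of_le (by omega)] at h
    have := h.length_le
    rw [pvMk_len] at this
    simp at this

theorem pv_find_append_left (v w : List Char)
    (h : 0 ≤ PySem.Chars.find v pvMk) :
    PySem.Chars.find (v ++ '\n' :: w) pvMk = PySem.Chars.find v pvMk := by
  obtain ⟨hpre, hmin⟩ := PySem.Chars.find_spec h
  set n := (PySem.Chars.find v pvMk).toNat with hn
  have hlen : n + 15 ≤ v.length := pv_occ_len hpre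
  have hbig : pvMk <+: (v ++ '\n' :: w).drop n := by
    rw [List.drop_append_of_le_length (by omega)]
    exact hpre.trans (List.prefix_append _ _)
  have hbigmin : ∀ i < n, ¬ pvMk <+: (v ++ '\n' :: w).drop i := by
    intro i hi hp
    rcases pv_straddle v w i hp with ⟨_, hp2⟩ | ⟨hge, _⟩
    · exact hmin i hi hp2
    · omega
  rw [find_eq_of_min _ _ n hbig hbigmin]
  omega

theorem pv_find_append_right (v w : List Char)
    (hnotv : ¬ pvMk <:+: v) :
    PySem.Chars.find (v ++ '\n' :: w) pvMk =
      if PySem.Chars.find w pvMk = -1 then -1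
      else ((v.length : Int) + 1) + PySem.Chars.find w pvMk := by
  by_cases hw : PySem.Chars.find w pvMk = -1
  · rw [if_pos hw]
    rw [PySem.Chars.find_eq_neg_one_iff] at hw ⊢
    intro hinf
    obtain ⟨a, b, hab⟩ := hinf
    have hdrop : pvMk <+: (v ++ '\n' :: w).drop a.length := by
      rw [← hab, List.append_assoc, List.drop_left]
      exact List.prefix_append _ _
    rcases pv_straddle v w a.length hdrop with ⟨_, hp⟩ | ⟨_, hp⟩
    · exact hnotv (infix_of_prefix_drop hp)
    · exact hw (infix_of_prefix_drop hp)
  · rw [if_neg hw]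
    have h0 : 0 ≤ PySem.Chars.find w pvMk := by
      have := PySem.Chars.neg_one_le_find w pvMk
      omega
    obtain ⟨hpre, hmin⟩ := PySem.Chars.find_spec h0
    set m := (PySem.Chars.find w pvMk).toNat with hm
    have hbig : pvMk <+: (v ++ '\n' :: w).drop (v.length + 1 + m) := by
      rw [pv_drop_big]
      exact hpre
    have hbigmin : ∀ i < v.length + 1 + m, ¬ pvMk <+: (v ++ '\n' :: w).drop i := by
      intro i hi hp
      rcases pv_straddle v w i hp with ⟨_, hp2⟩ | ⟨hge, hp2⟩
      · exact hnotv (infix_of_prefix_drop hp2)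
      · exact hmin _ (by omega) hp2
    rw [find_eq_of_min _ _ (v.length + 1 + m) hbig hbigmin]
    push_cast
    omega

theorem pvMk_split : pvMk = "Serial port".toList ++ ' ' :: "COM".toList := by decide

theorem pv_lastTok (v : List Char) (h : 0 ≤ PySem.Chars.find v pvMk) :
    (pvSplitCh ' ' [] ("COM".toList ++ v.drop ((PySem.Chars.find v pvMk).toNat + 15))).getLast?
      = (pvSplitCh ' ' [] v).getLast? := by
  obtain ⟨hpre, _⟩ := PySem.Chars.find_spec h
  set n := (PySem.Chars.find v pvMk).toNat with hn
  have hdec : v = (v.take n ++ "Serial port".toList) ++ ' ' :: ("COM".toList ++ v.drop (n + 15)) := by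
    have h1 : pvMk ++ (v.drop n).drop pvMk.length = v.drop n := List.prefix_iff_eq_append.1 hpre
    have h2 : (v.drop n).drop pvMk.length = v.drop (n + 15) := by
      rw [pvMk_len, List.drop_drop, Nat.add_comm]
    rw [h2] at h1
    conv_lhs => rw [← List.take_append_drop n v, ← h1, pvMk_split]
    simp
  conv_rhs => rw [hdec]
  exact (pvSplitCh_getLast_append ' ' _ _ []).symm

theorem pv_no_nl_drop {v : List Char} (hv : '\n' ∉ v) (k : Nat) : '\n' ∉ v.drop k :=
  fun hm => hv (List.drop_subset k v hm)

-- the heart: B's global search over the joined lines equals A's per-line loop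
theorem pv_main (L : List (List Char)) (h : ∀ x ∈ L, '\n' ∉ x) :
    pvBCore (pvJoin '\n' L) = pvALoop0 L := by
  induction L with
  | nil =>
    show pvBCore [] = none
    rw [pvBCore, if_pos (by decide)]
  | cons v rest ih =>
    have hv : '\n' ∉ v := h v List.mem_cons_self
    have hrest : ∀ x ∈ rest, '\n' ∉ x := fun x hx => h x (List.mem_cons_of_mem _ hx)
    cases rest with
    | nil =>
      have hJ : pvJoin '\n' [v] = v := by simp [pvJoin]
      rw [hJ]
      by_cases hf : PySem.Chars.find v pvMk = -1
      · rw [pvBCore, if_pos hf]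
        simp [pvALoop0, hf]
      · have h0 : 0 ≤ PySem.Chars.find v pvMk := by
          have := PySem.Chars.neg_one_le_find v pvMk
          omega
        rw [pvBCore, if_neg hf, splitOnMax_one_head,
            takeWhile_all '\n' _ (pv_no_nl_drop hv _)]
        rw [pvALoop0, if_pos hf]
        simp only []
        rw [splitOn_eq, splitOn_eq, pyGet_neg_one, pyGet_neg_one]
        exact pv_lastTok v h0
    | cons y r' =>
      have hJ : pvJoin '\n' (v :: y :: r') = v ++ '\n' :: pvJoin '\n' (y :: r') := by
        simp [pvJoin]
      set w := pvJoin '\n' (y :: r') with hw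
      rw [hJ]
      by_cases hf : PySem.Chars.find v pvMk = -1
      · -- marker not in this line: B skips to the tail, matching A's recursion
        have hni : ¬ pvMk <:+: v := (PySem.Chars.find_eq_neg_one_iff _ _).1 hf
        have hfa := pv_find_append_right v w hni
        rw [pvALoop0, if_neg (by simpa using hf), ← ih hrest]
        by_cases hfw : PySem.Chars.find w pvMk = -1
        · rw [pvBCore, if_pos (by rw [hfa, if_pos hfw]), pvBCore, if_pos hfw]
        · have h0w : 0 ≤ PySem.Chars.find w pvMk := by
            have := PySem.Chars.neg_one_le_find w pvMk
            omega
          set m := (PySem.Chars.find w pvMk).toNat with hm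
          have hfa2 : PySem.Chars.find (v ++ '\n' :: w) pvMk = ((v.length + 1 + m : Nat) : Int) := by
            rw [hfa, if_neg hfw]
            push_cast
            omega
          have hfne : PySem.Chars.find (v ++ '\n' :: w) pvMk ≠ -1 := by
            rw [hfa2]
            omega
          rw [pvBCore, if_neg hfne, hfa2]
          rw [show ((v.length + 1 + m : Nat) : Int).toNat = v.length + 1 + m by omega]
          rw [show v.length + 1 + m + 15 = v.length + 1 + (m + 15) by omega, pv_drop_big]
          rw [pvBCore, if_neg hfw, ← hm]
      · -- marker in this line: B's occurrence is A's, the slice stops at the '\n'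
        have h0 : 0 ≤ PySem.Chars.find v pvMk := by
          have := PySem.Chars.neg_one_le_find v pvMk
          omega
        obtain ⟨hpre, _⟩ := PySem.Chars.find_spec h0
        set n := (PySem.Chars.find v pvMk).toNat with hn
        have hlen : n + 15 ≤ v.length := pv_occ_len hpre
        have hfa := pv_find_append_left v w h0
        have hfne : PySem.Chars.find (v ++ '\n' :: w) pvMk ≠ -1 := by rw [hfa]; omega
        rw [pvBCore, if_neg hfne, hfa, ← hn]
        rw [List.drop_append_of_le_length (by omega)]
        rw [splitOnMax_one_head, takeWhile_append_stop '\n' _ _ (pv_no_nl_drop hv _)]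
        rw [pvALoop0, if_pos hf]
        simp only []
        rw [splitOn_eq, splitOn_eq, pyGet_neg_one, pyGet_neg_one]
        exact pv_lastTok v h0

theorem pv_mk_lit : "Serial port COM".toList = pvMk := rfl

theorem pv_aLoop_eq (L : List (List Char)) :
    pvALoop L = pvALoop0 (L.map (List.filter (· ≠ '\r'))) := by
  induction L with
  | nil => rfl
  | cons v rest ih =>
    show (let tmpv := PySem.Chars.replace v ['\r'] [];
          if PySem.Chars.find tmpv "Serial port COM".toList ≠ -1 then
            PySem.List.pyGet? (PySem.Chars.splitOn tmpv [' ']) (-1)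
          else pvALoop rest) = _
    rw [List.map_cons, replace_cr, pv_mk_lit]
    by_cases hf : PySem.Chars.find (v.filter (· ≠ '\r')) pvMk ≠ -1
    · rw [if_pos hf, pvALoop0, if_pos hf]
    · rw [if_neg hf, pvALoop0, if_neg hf, ih]

theorem pv_alt_eq (s : String) :
    findComPortFromStr_alt s = (pvBCore (s.toList.filter (· ≠ '\r'))).map String.ofList := by
  show (let clean := PySem.Chars.replace s.toList ['\r'] [];
        let i := PySem.Chars.find clean "Serial port COM".toList;
        if i = -1 then none
        else
          let tail := clean.drop (i.toNat + 15)
          match PySem.List.pyGet? (PySem.Chars.splitOnMax tail ['\n'] 1) 0 with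
          | none => none
          | some restOfLine =>
            (PySem.List.pyGet? (PySem.Chars.splitOn ("COM".toList ++ restOfLine) [' ']) (-1)).map String.ofList) = _
  rw [replace_cr, pv_mk_lit]
  set clean := s.toList.filter (· ≠ '\r') with hc
  by_cases hf : PySem.Chars.find clean pvMk = -1
  · rw [pvBCore, if_pos hf]
    simp [hf]
  · rw [pvBCore, if_neg hf]
    simp only [hf, if_false]
    rw [splitOnMax_one_head]

-- ===== VERDICT (by name: the statement is the Claim_ definition above) =====
theorem findComPortFromStr_spec : Claim_equal_findComPortFromStr := by
  intro s _
  unfold Spec_findComPortFromStr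
  rw [pv_alt_eq]
  have hA : findComPortFromStr s
      = (pvALoop0 ((pvSplitCh '\n' [] s.toList).map (List.filter (· ≠ '\r')))).map String.ofList := by
    unfold findComPortFromStr
    rw [pv_aLoop_eq, splitOn_eq]
  rw [hA]
  set L := (pvSplitCh '\n' [] s.toList).map (List.filter (· ≠ '\r')) with hL
  have hno : ∀ x ∈ L, '\n' ∉ x := by
    intro x hx hmem
    rw [hL] at hx
    obtain ⟨y, hy, rfl⟩ := List.mem_map.1 hx
    exact pvSplitCh_no_c '\n' s.toList [] (by simp) y hy (List.mem_of_mem_filter hmem)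
  have hjoin : pvJoin '\n' L = s.toList.filter (· ≠ '\r') := by
    rw [hL, pvJoin_map_filter '\n' _ (by decide), pvJoin_pvSplitCh]
    simp
  rw [← hjoin, pv_main L hno]
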